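-- pv_equiv track=rewrite | github.com/fionaGmcintosh/tumor_ide_project | tumor_models.py | generate_treatment_schedule
-- ===== SOURCE A (Python) =====
-- from typing import List, Tuple, Dict, Callable
--
-- def generate_treatment_schedule(start_day: int = 0, duration_weeks: int = 8,
--                                days_per_week: int = 5) -> List[float]:
--     """
--     Generate radiation treatment schedule (5 days per week).
--
--     Args:
--         start_day: Day to start treatment
--         duration_weeks: Number of weeks of treatment
--         days_per_week: Number of treatment days per week (default 5)
--
--     Returns:
--         List of treatment times in days
--     """
--     treatment_times = []
--
--     for week in range(duration_weeks):
--         for day in range(days_per_week):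
--             treatment_day = start_day + week * 7 + day
--             treatment_times.append(treatment_day)
--
--     return treatment_times
-- ===== SOURCE B (Python) =====
-- def generate_treatment_schedule(start_day: int = 0, duration_weeks: int = 8,
--                                 days_per_week: int = 5):
--     weeks = max(duration_weeks, 0)
--     days = max(days_per_week, 0)
--     return [start_day + 7 * (i // days) + i % days for i in range(weeks * days)]
-- ===== Notes on version B (the rewrite author's own statement) =====
-- stated objective: alternative
-- what changed: Replaces the nested week/day loops with one flat comprehension over range(weeks*days) that recovers week and day via // and %.
import Mathlib
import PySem

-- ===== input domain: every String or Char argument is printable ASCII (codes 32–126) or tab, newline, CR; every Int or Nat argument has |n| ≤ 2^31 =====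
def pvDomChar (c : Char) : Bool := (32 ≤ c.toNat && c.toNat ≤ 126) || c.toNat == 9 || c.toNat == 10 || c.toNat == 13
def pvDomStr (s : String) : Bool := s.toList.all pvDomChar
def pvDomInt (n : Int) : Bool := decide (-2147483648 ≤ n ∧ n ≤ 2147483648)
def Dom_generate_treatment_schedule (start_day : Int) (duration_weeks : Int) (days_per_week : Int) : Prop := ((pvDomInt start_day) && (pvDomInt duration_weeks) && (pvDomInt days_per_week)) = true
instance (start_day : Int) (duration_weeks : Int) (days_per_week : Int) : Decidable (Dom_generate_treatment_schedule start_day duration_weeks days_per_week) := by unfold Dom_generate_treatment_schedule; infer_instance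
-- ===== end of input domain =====

-- B replaces A's nested week/day loops by one flat pass over range(weeks*days),
-- recovering week and day with // and % (alternative decomposition, same cost).

-- ===== PORT A =====
def generate_treatment_schedule (start_day : Int) (duration_weeks : Int) (days_per_week : Int) : List Int :=
  (PySem.List.pyRange 0 duration_weeks 1).foldl (fun treatment_times week =>
    (PySem.List.pyRange 0 days_per_week 1).foldl (fun acc day =>
      acc ++ [start_day + week * 7 + day]) treatment_times) []

-- ===== PORT B =====
def generate_treatment_schedule_alt (start_day : Int) (duration_weeks : Int) (days_per_week : Int) : List Int :=
  let weeks := max duration_weeks 0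
  let days := max days_per_week 0
  (PySem.List.pyRange 0 (weeks * days) 1).map
    (fun i => start_day + 7 * PySem.Int.floordiv i days + PySem.Int.mod i days)

-- ===== PRECONDITION & SPEC =====
def Spec_generate_treatment_schedule (start_day : Int) (duration_weeks : Int) (days_per_week : Int) (out : List Int) : Prop := out = generate_treatment_schedule_alt start_day duration_weeks days_per_week
instance (start_day : Int) (duration_weeks : Int) (days_per_week : Int) (out : List Int) : Decidable (Spec_generate_treatment_schedule start_day duration_weeks days_per_week out) := by unfold Spec_generate_treatment_schedule; infer_instance

-- ===== CLAIM (what is proved, stated in full; the proofs are below) =====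
def Claim_equal_generate_treatment_schedule : Prop := ∀ (start_day : Int) (duration_weeks : Int) (days_per_week : Int), Dom_generate_treatment_schedule start_day duration_weeks days_per_week → Spec_generate_treatment_schedule start_day duration_weeks days_per_week (generate_treatment_schedule start_day duration_weeks days_per_week)

-- ===== LEMMAS AND PROOFS =====

theorem gts_a_eq_flatMap (s w d : Int) :
    generate_treatment_schedule s w d
      = (PySem.List.pyRange 0 w 1).flatMap (fun week =>
          (PySem.List.pyRange 0 d 1).map (fun day => s + week * 7 + day)) := by
  simp only [generate_treatment_schedule, PySem.List.foldl_append_singleton_eq_map,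
        PySem.List.foldl_append_eq_flatMap, List.nil_append]

theorem gts_key (s d : Int) (hd : 0 < d) : ∀ (n : Nat),
    (PySem.List.pyRange 0 (n : Int) 1).flatMap (fun week =>
        (PySem.List.pyRange 0 d 1).map (fun day => s + week * 7 + day))
      = (PySem.List.pyRange 0 ((n : Int) * d) 1).map
          (fun i => s + 7 * PySem.Int.floordiv i d + PySem.Int.mod i d) := by
  intro n
  induction n with
  | zero => simp [PySem.List.pyRange_one_eq_nil]
  | succ n ih =>
    have h1 : ((n + 1 : Nat) : Int) = (n : Int) + 1 := by push_cast; ring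
    rw [h1, PySem.List.pyRange_one_succ_right (by positivity), List.flatMap_append, ih,
        PySem.List.pyRange_one_append 0 ((n : Int) * d) (((n : Int) + 1) * d)
          (by positivity) (by nlinarith), List.map_append]
    congr 1
    have h2 : ((n : Int) + 1) * d - (n : Int) * d = d := by ring
    rw [List.flatMap_cons, List.flatMap_nil, List.append_nil,
        PySem.List.pyRange_one ((n : Int) * d) (((n : Int) + 1) * d), h2,
        PySem.List.pyRange_one 0 d, List.map_map, List.map_map]
    simp only [sub_zero]
    refine List.map_congr_left ?_
    intro k hk
    have hk' : (k : Int) < d := by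
      have := List.mem_range.mp hk
      omega
    have hdiv : PySem.Int.floordiv ((n : Int) * d + (k : Int)) d = (n : Int) := by
      rw [PySem.Int.floordiv_eq_iff_of_pos hd]
      constructor
      · omega
      · nlinarith
    have hmod : PySem.Int.mod ((n : Int) * d + (k : Int)) d = (k : Int) := by
      have := PySem.Int.floordiv_mul_add_mod ((n : Int) * d + (k : Int)) d
      rw [hdiv] at this
      omega
    simp only [Function.comp_apply, zero_add, hdiv, hmod]
    ring

-- ===== VERDICT (by name: the statement is the Claim_ definition above) =====
theorem generate_treatment_schedule_spec : Claim_equal_generate_treatment_schedule := by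
  intro s w d _
  unfold Spec_generate_treatment_schedule generate_treatment_schedule_alt
  rw [gts_a_eq_flatMap]
  by_cases hw : 0 < w
  · by_cases hd : 0 < d
    · have hw' : max w 0 = w := max_eq_left hw.le
      have hd' : max d 0 = d := max_eq_left hd.le
      simp only [hw', hd']
      have := gts_key s d hd w.toNat
      rwa [Int.toNat_of_nonneg hw.le] at this
    · have hd' : max d 0 = 0 := max_eq_right (by omega)
      simp [hd', PySem.List.pyRange_one_eq_nil (le_refl (0 : Int)),
            PySem.List.pyRange_one_eq_nil (show d ≤ 0 by omega)]
  · have hw' : max w 0 = 0 := max_eq_right (by omega)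
    simp [hw', PySem.List.pyRange_one_eq_nil (le_refl (0 : Int)),
          PySem.List.pyRange_one_eq_nil (show w ≤ 0 by omega)]
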